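-- pv_equiv track=rewrite | github.com/Team-Izy/Donjon-CTF-2020-writeups | side-channel/projective-signature/first__extract_Z.py | inv_gcd_from_trace
-- ===== SOURCE A (Python) =====
-- def inv_gcd_from_trace(trace):
--     a = 0
--     b = 1
--     for ch in trace[::-1]:
--         if ch == "A":
--             a = (a * 2) + b
--             a, b = b, a
--         elif ch == "B":
--             a = (a * 2) + b
--         elif ch == "C":
--             a *= 2
--         else:
--             assert False
--     return a
-- ===== SOURCE B (Python) =====
-- _M = {"A": ((0, 1), (2, 1)), "B": ((2, 1), (0, 1)), "C": ((2, 0), (0, 1))}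
--
-- def inv_gcd_from_trace(trace):
--     # forward pass, composing the 2x2 linear action of each character
--     p, q, r, s = 1, 0, 0, 1
--     for ch in trace:
--         (m00, m01), (m10, m11) = _M[ch]
--         p, q, r, s = (p * m00 + q * m10, p * m01 + q * m11,
--                       r * m00 + s * m10, r * m01 + s * m11)
--     return q
-- ===== Notes on version B (the rewrite author's own statement) =====
-- stated objective: alternative
-- what changed: B replaces A's backward scan with two scalar accumulators by a forward scan composing a running 2x2 integer matrix product (each character acts as a fixed linear map), returning the product's top-right entry.
import Mathlib
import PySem

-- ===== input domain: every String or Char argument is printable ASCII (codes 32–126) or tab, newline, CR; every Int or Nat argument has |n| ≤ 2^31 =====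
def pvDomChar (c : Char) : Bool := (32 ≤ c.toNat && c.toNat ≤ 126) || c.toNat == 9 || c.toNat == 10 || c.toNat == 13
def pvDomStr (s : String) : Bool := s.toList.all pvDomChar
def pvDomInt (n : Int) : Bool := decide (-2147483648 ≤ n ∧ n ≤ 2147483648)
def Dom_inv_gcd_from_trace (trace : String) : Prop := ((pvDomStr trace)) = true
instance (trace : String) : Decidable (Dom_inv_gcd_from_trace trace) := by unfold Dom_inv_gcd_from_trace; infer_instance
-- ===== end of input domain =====

-- B changes the decomposition (forward matrix-product composition instead of A's backward
-- two-scalar recurrence); equal on all traces over the three valid alphabet characters (elsewhere Python A asserts).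

-- ===== PORT A =====
-- loop body of A, iterated over the reversed trace; the final `else` branch is Python's
-- `assert False` (an exception), excluded by Pre_; the port leaves the state unchanged there
def pvStepA (ab : Int × Int) (ch : Char) : Int × Int :=
  if ch = 'A' then (ab.2, ab.1 * 2 + ab.2)
  else if ch = 'B' then (ab.1 * 2 + ab.2, ab.2)
  else if ch = 'C' then (ab.1 * 2, ab.2)
  else ab

def inv_gcd_from_trace (trace : String) : Int :=
  (trace.toList.reverse.foldl pvStepA (0, 1)).1

-- ===== PORT B =====
-- the fixed 2x2 matrix of each character, rows flattened (m00, m01, m10, m11);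
-- on an invalid character Python B's dict lookup raises KeyError (excluded by Pre_); identity here
def pvMat (ch : Char) : Int × Int × Int × Int :=
  if ch = 'A' then (0, 1, 2, 1)
  else if ch = 'B' then (2, 1, 0, 1)
  else if ch = 'C' then (2, 0, 0, 1)
  else (1, 0, 0, 1)

def pvMul (P M : Int × Int × Int × Int) : Int × Int × Int × Int :=
  (P.1 * M.1 + P.2.1 * M.2.2.1, P.1 * M.2.1 + P.2.1 * M.2.2.2,
   P.2.2.1 * M.1 + P.2.2.2 * M.2.2.1, P.2.2.1 * M.2.1 + P.2.2.2 * M.2.2.2)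

def inv_gcd_from_trace_alt (trace : String) : Int :=
  (trace.toList.foldl (fun P ch => pvMul P (pvMat ch)) (1, 0, 0, 1)).2.1

-- ===== PRECONDITION & SPEC =====
-- Pre_ excludes exactly the traces containing a character outside the valid alphabet,
-- on which Python A raises AssertionError (and Python B raises KeyError).
def Pre_inv_gcd_from_trace (trace : String) : Prop :=
  trace.toList.all (fun c => c == 'A' || c == 'B' || c == 'C') = true
instance (trace : String) : Decidable (Pre_inv_gcd_from_trace trace) := by
  unfold Pre_inv_gcd_from_trace; infer_instance

def pvWitness_inv_gcd_from_trace : String := "ABCCBA"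

def Spec_inv_gcd_from_trace (trace : String) (out : Int) : Prop := out = inv_gcd_from_trace_alt trace
instance (trace : String) (out : Int) : Decidable (Spec_inv_gcd_from_trace trace out) := by unfold Spec_inv_gcd_from_trace; infer_instance

-- ===== CLAIM (what is proved, stated in full; the proofs are below) =====
def Claim_equal_inv_gcd_from_trace : Prop := ∀ (trace : String), Dom_inv_gcd_from_trace trace → Pre_inv_gcd_from_trace trace → Spec_inv_gcd_from_trace trace (inv_gcd_from_trace trace)

-- ===== LEMMAS AND PROOFS =====

-- action of a character's matrix on the state vector (a, b)
def pvApply (M : Int × Int × Int × Int) (v : Int × Int) : Int × Int :=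
  (M.1 * v.1 + M.2.1 * v.2, M.2.2.1 * v.1 + M.2.2.2 * v.2)

theorem pvStepA_eq_apply (ab : Int × Int) (ch : Char) :
    pvStepA ab ch = pvApply (pvMat ch) ab := by
  obtain ⟨a, b⟩ := ab
  simp only [pvStepA, pvMat]
  split_ifs <;> simp [pvApply] <;> ring

theorem pvMul_assoc (P Q R : Int × Int × Int × Int) :
    pvMul (pvMul P Q) R = pvMul P (pvMul Q R) := by
  obtain ⟨a, b, c, d⟩ := P; obtain ⟨e, f, g, h⟩ := Q; obtain ⟨i, j, k, l⟩ := R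
  simp only [pvMul, Prod.mk.injEq]
  refine ⟨by ring, by ring, by ring, by ring⟩

theorem pvMul_one (P : Int × Int × Int × Int) : pvMul P (1, 0, 0, 1) = P := by
  obtain ⟨a, b, c, d⟩ := P
  simp only [pvMul, Prod.mk.injEq]
  refine ⟨by ring, by ring, by ring, by ring⟩

theorem pvOne_mul (P : Int × Int × Int × Int) : pvMul (1, 0, 0, 1) P = P := by
  obtain ⟨a, b, c, d⟩ := P
  simp only [pvMul, Prod.mk.injEq]
  refine ⟨by ring, by ring, by ring, by ring⟩

theorem pvApply_mul (P Q : Int × Int × Int × Int) (v : Int × Int) :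
    pvApply (pvMul P Q) v = pvApply P (pvApply Q v) := by
  obtain ⟨a, b, c, d⟩ := P; obtain ⟨e, f, g, h⟩ := Q; obtain ⟨x, y⟩ := v
  simp only [pvApply, pvMul, Prod.mk.injEq]
  exact ⟨by ring, by ring⟩

-- folding the matrix product from an arbitrary start Q factors through the identity start
theorem pvFoldl_mul (l : List Char) (Q : Int × Int × Int × Int) :
    l.foldl (fun P ch => pvMul P (pvMat ch)) Q
      = pvMul Q (l.foldl (fun P ch => pvMul P (pvMat ch)) (1, 0, 0, 1)) := by
  induction l generalizing Q with
  | nil => simp [pvMul_one]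
  | cons c l ih =>
    simp only [List.foldl_cons]
    rw [ih (pvMul Q (pvMat c)), ih (pvMul (1, 0, 0, 1) (pvMat c)), pvOne_mul, pvMul_assoc]

-- A's backward scalar scan equals applying B's forward matrix product to the initial vector
theorem pvScan_eq (l : List Char) (v : Int × Int) :
    l.reverse.foldl pvStepA v
      = pvApply (l.foldl (fun P ch => pvMul P (pvMat ch)) (1, 0, 0, 1)) v := by
  induction l generalizing v with
  | nil => obtain ⟨a, b⟩ := v; simp [pvApply]
  | cons c l ih =>
    simp only [List.reverse_cons, List.foldl_append, List.foldl_cons, List.foldl_nil,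
      List.foldl_cons]
    rw [ih, pvStepA_eq_apply, pvFoldl_mul l (pvMul (1, 0, 0, 1) (pvMat c)), pvOne_mul,
      pvApply_mul]

-- ===== VERDICT (by name: the statement is the Claim_ definition above) =====
theorem inv_gcd_from_trace_spec : Claim_equal_inv_gcd_from_trace := by
  intro trace _ _
  unfold Spec_inv_gcd_from_trace inv_gcd_from_trace inv_gcd_from_trace_alt
  rw [pvScan_eq]
  obtain ⟨p, q, r, s⟩ := trace.toList.foldl (fun P ch => pvMul P (pvMat ch)) (1, 0, 0, 1)
  simp [pvApply]
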